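-- pv_equiv track=rewrite | github.com/McEwenAle/ST0245-001 | laboratorios/lab03/codigo/PosicionDePivote.py | equilibrio
-- ===== SOURCE A (Python) =====
-- def equilibrio(l):
--     suma = 0
--     for e in l:
--         suma += e
--
--     m = float('inf')
--     ind = -1
--     suma2 = 0
--     for i in range(len(l)):
--         suma -= l[i]
--         if abs(suma - suma2) < m:
--             ind = i
--             m = abs(suma - suma2)
--         suma2 += l[i]
--     return ind
-- ===== SOURCE B (Python) =====
-- def equilibrio(l):
--     if not l:
--         return -1
--     total = sum(l)
--     pref = []
--     run = 0
--     for x in l: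
--         pref.append(run)
--         run += x
--     diffs = [abs(total - 2 * p - x) for p, x in zip(pref, l)]
--     return diffs.index(min(diffs))
-- ===== Notes on version B (the rewrite author's own statement) =====
-- stated objective: alternative
-- what changed: Replaces A's single stateful loop (running right-sum, left-sum and manual strict-< argmin with an infinity sentinel) by a prefix-sum table, a comprehension of the |right-left| differences, and a declarative diffs.index(min(diffs)) for the earliest minimizing index.
import Mathlib
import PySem

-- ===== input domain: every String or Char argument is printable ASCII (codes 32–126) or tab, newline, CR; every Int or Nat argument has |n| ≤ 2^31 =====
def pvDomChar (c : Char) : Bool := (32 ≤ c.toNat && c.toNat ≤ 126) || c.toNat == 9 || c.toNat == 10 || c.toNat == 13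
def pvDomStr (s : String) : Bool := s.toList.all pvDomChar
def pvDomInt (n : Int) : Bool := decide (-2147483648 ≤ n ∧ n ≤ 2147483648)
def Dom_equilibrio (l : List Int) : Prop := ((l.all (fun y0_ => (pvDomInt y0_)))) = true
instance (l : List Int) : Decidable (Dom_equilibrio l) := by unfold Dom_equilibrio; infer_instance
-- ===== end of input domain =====

-- B replaces A's manual running-argmin loop by a prefix-sum table, a comprehension of
-- the |right sum - left sum| differences, and a declarative diffs.index(min(diffs));
-- objective: alternative decomposition (same O(n) cost).

-- ===== PORT A =====
-- A's state is (suma, m, ind, suma2, i); Python's m = float('inf') is modelled as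
-- Option Int with none = infinity (first comparison always succeeds, as in Python).
-- The 'for i in range(len(l)) … l[i]' loop is ported as a fold over l carrying i.
def stepA (st : Int × Option Int × Int × Int × Int) (x : Int) : Int × Option Int × Int × Int × Int :=
  let s' := st.1 - x
  let k := |s' - st.2.2.2.1|
  if (match st.2.1 with | none => true | some mv => decide (k < mv)) then
    (s', some k, st.2.2.2.2, st.2.2.2.1 + x, st.2.2.2.2 + 1)
  else
    (s', st.2.1, st.2.2.1, st.2.2.2.1 + x, st.2.2.2.2 + 1)

def equilibrio (l : List Int) : Int :=
  let suma := l.foldl (fun a e => a + e) 0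
  (l.foldl stepA (suma, none, -1, 0, 0)).2.2.1

-- ===== PORT B =====
-- pref.append(run); run += x
def stepB (st : List Int × Int) (x : Int) : List Int × Int :=
  (st.1 ++ [st.2], st.2 + x)

def equilibrio_alt (l : List Int) : Int :=
  if l = [] then -1
  else
    let total := l.foldl (fun a e => a + e) 0
    let pref := (l.foldl stepB ([], 0)).1
    let diffs := (pref.zip l).map (fun pz => |total - 2 * pz.1 - pz.2|)
    match PySem.List.min? diffs (fun x => x) with
    | none => -1
    | some mn =>
      match PySem.List.index? diffs mn with
      | some j => (j : Int)
      | none => -1  -- unreachable: min(diffs) ∈ diffs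

-- ===== PRECONDITION & SPEC =====
def Spec_equilibrio (l : List Int) (out : Int) : Prop := out = equilibrio_alt l
instance (l : List Int) (out : Int) : Decidable (Spec_equilibrio l out) := by unfold Spec_equilibrio; infer_instance

-- ===== CLAIM (what is proved, stated in full; the proofs are below) =====
def Claim_equal_equilibrio : Prop := ∀ (l : List Int), Dom_equilibrio l → Spec_equilibrio l (equilibrio l)

-- ===== LEMMAS AND PROOFS =====

-- abstract argmin loop over the list of keys (state of A minus the sums)
def amF (m : Option Int) (ind i : Int) : List Int → Int
  | [] => ind
  | k :: ks =>
    if (match m with | none => true | some mv => decide (k < mv)) then amF (some k) i (i + 1) ks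
    else amF m ind (i + 1) ks

-- the key sequence generated by A's loop from state (s, p)
def dkeys (s p : Int) : List Int → List Int
  | [] => []
  | x :: xs => |s - x - p| :: dkeys (s - x) (p + x) xs

-- B's prefix-sum table
def prefs (r : Int) : List Int → List Int
  | [] => []
  | x :: xs => r :: prefs (r + x) xs

-- first minimum value of a nonempty list (head pushed in)
def ksmin : List Int → Int
  | [] => 0
  | k :: t => t.foldl min k

theorem foldA_eq (l : List Int) : ∀ (s p i : Int) (m : Option Int) (ind : Int),
    (l.foldl stepA (s, m, ind, p, i)).2.2.1 = amF m ind i (dkeys s p l) := by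
  induction l with
  | nil => intro s p i m ind; rfl
  | cons x xs ih =>
    intro s p i m ind
    simp only [List.foldl_cons, stepA, amF, dkeys]
    by_cases h : (match m with | none => true | some mv => decide (|s - x - p| < mv)) = true
    · simp only [h, if_true, ih]
    · simp only [h, Bool.not_eq_true] at *
      simp [ih]

theorem foldB_eq (l : List Int) : ∀ (acc : List Int) (r : Int),
    (l.foldl stepB (acc, r)).1 = acc ++ prefs r l := by
  induction l with
  | nil => intro acc r; simp [prefs]
  | cons x xs ih => intro acc r; simp [stepB, prefs, ih]

theorem zip_prefs_eq_dkeys (l : List Int) : ∀ (tot p : Int),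
    ((prefs p l).zip l).map (fun pz => |tot - 2 * pz.1 - pz.2|) = dkeys (tot - p) p l := by
  induction l with
  | nil => intro tot p; simp [prefs, dkeys]
  | cons x xs ih =>
    intro tot p
    simp only [prefs, dkeys, List.zip_cons_cons, List.map_cons]
    rw [show tot - p - x - p = tot - 2 * p - x from by ring,
        show tot - p - x = tot - (p + x) from by ring, ih]

theorem foldl_min_min (t : List Int) : ∀ (a b : Int), t.foldl min (min a b) = min a (t.foldl min b) := by
  induction t with
  | nil => intro a b; simp
  | cons x xs ih =>
    intro a b
    simp only [List.foldl_cons]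
    rw [min_assoc, ih]

theorem foldl_min_le_init (t : List Int) : ∀ (k : Int), t.foldl min k ≤ k := by
  induction t with
  | nil => intro k; simp
  | cons x xs ih =>
    intro k
    simp only [List.foldl_cons]
    exact le_trans (ih _) (min_le_left _ _)

theorem foldl_min_le_mem (t : List Int) : ∀ (k j : Int), j ∈ t → t.foldl min k ≤ j := by
  induction t with
  | nil => intro k j h; simp at h
  | cons x xs ih =>
    intro k j h
    simp only [List.foldl_cons]
    rcases List.mem_cons.mp h with h | h
    · subst h; exact le_trans (foldl_min_le_init _ _) (min_le_right _ _)
    · exact ih _ _ h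

theorem foldl_min_eq_self (t : List Int) : ∀ (k : Int), (∀ j ∈ t, k ≤ j) → t.foldl min k = k := by
  induction t with
  | nil => intro k _; rfl
  | cons x xs ih =>
    intro k h
    simp only [List.foldl_cons]
    rw [min_eq_left (h x (by simp)), ih k (fun j hj => h j (by simp [hj]))]

theorem foldl_min_mem_or (t : List Int) : ∀ (k : Int), t.foldl min k = k ∨ t.foldl min k ∈ t := by
  induction t with
  | nil => intro k; left; rfl
  | cons x xs ih =>
    intro k
    simp only [List.foldl_cons]
    rcases ih (min k x) with h | h
    · rw [h]
      rcases le_total k x with h2 | h2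
      · left; exact min_eq_left h2
      · right; rw [min_eq_right h2]; simp
    · right; simp [h]

theorem ksmin_mem (k : Int) (t : List Int) : ksmin (k :: t) ∈ k :: t := by
  simp only [ksmin]
  rcases foldl_min_mem_or t k with h | h
  · rw [h]; simp
  · simp [h]

theorem ksmin_cons_cons (k r : Int) (rt : List Int) :
    ksmin (k :: r :: rt) = min k (ksmin (r :: rt)) := by
  simp only [ksmin, List.foldl_cons]
  rw [foldl_min_min]

theorem ksmin_le_mem (t : List Int) (j : Int) (h : j ∈ t) : ksmin t ≤ j := by
  cases t with
  | nil => simp at h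
  | cons k tl =>
    simp only [ksmin]
    rcases List.mem_cons.mp h with h | h
    · subst h; exact foldl_min_le_init _ _
    · exact foldl_min_le_mem _ _ _ h

-- the main characterisation: the strict-improvement argmin fold returns
-- (offset by i) the first index of the minimum among the keys below mv
theorem amF_some (ks : List Int) : ∀ (mv ind i : Int),
    amF (some mv) ind i ks =
      if ks.all (fun k => decide (mv ≤ k)) then ind
      else i + (((PySem.List.index? ks (ksmin ks)).getD 0 : Nat) : Int) := by
  induction ks with
  | nil => intro mv ind i; simp [amF]
  | cons k t ih =>
    intro mv ind i
    simp only [amF]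
    by_cases hk : k < mv
    · rw [if_pos (by simp [hk]), ih k i (i + 1)]
      have hall : ¬((k :: t).all (fun j => decide (mv ≤ j)) = true) := by
        simp only [List.all_cons, Bool.and_eq_true, decide_eq_true_eq]
        rintro ⟨hmk, -⟩
        exact absurd hmk (not_le.mpr hk)
      rw [if_neg hall]
      by_cases ht : t.all (fun j => decide (k ≤ j)) = true
      · rw [if_pos ht]
        have hfold : ksmin (k :: t) = k := by
          simp only [ksmin]
          exact foldl_min_eq_self t k (by simpa using ht)
        rw [hfold, PySem.List.index?_cons_self]
        simp
      · rw [if_neg ht]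
        simp only [List.all_eq_true, not_forall] at ht
        obtain ⟨j, hj, hjk⟩ := ht
        simp only [decide_eq_true_eq, not_le] at hjk
        cases t with
        | nil => simp at hj
        | cons r rt =>
          have hmin_lt : ksmin (r :: rt) < k :=
            lt_of_le_of_lt (ksmin_le_mem _ _ hj) hjk
          rw [ksmin_cons_cons, min_eq_right (le_of_lt hmin_lt)]
          rw [PySem.List.index?_cons_of_ne _ (ne_of_gt hmin_lt)]
          obtain ⟨i0, hi0⟩ := (PySem.List.index?_isSome_iff (r :: rt) (ksmin (r :: rt))).mpr
            (ksmin_mem r rt) |> Option.isSome_iff_exists.mp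
          rw [hi0]
          simp only [Option.map_some, Option.getD_some]
          push_cast
          ring
    · rw [if_neg (by simp [hk]), ih mv ind (i + 1)]
      have hmvk : mv ≤ k := not_lt.mp hk
      by_cases ht : t.all (fun j => decide (mv ≤ j)) = true
      · rw [if_pos ht, if_pos (by simp [hmvk]; simpa using ht)]
      · rw [if_neg ht]
        have hall : ¬((k :: t).all (fun j => decide (mv ≤ j)) = true) := by
          simp only [List.all_cons, Bool.and_eq_true] at *
          tauto
        rw [if_neg hall]
        simp only [List.all_eq_true, not_forall] at ht
        obtain ⟨j, hj, hjk⟩ := ht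
        simp only [decide_eq_true_eq, not_le] at hjk
        cases t with
        | nil => simp at hj
        | cons r rt =>
          have hmin_lt : ksmin (r :: rt) < k :=
            lt_of_le_of_lt (ksmin_le_mem _ _ hj) (lt_of_lt_of_le hjk hmvk)
          rw [ksmin_cons_cons, min_eq_right (le_of_lt hmin_lt)]
          rw [PySem.List.index?_cons_of_ne _ (ne_of_gt hmin_lt)]
          obtain ⟨i0, hi0⟩ := (PySem.List.index?_isSome_iff (r :: rt) (ksmin (r :: rt))).mpr
            (ksmin_mem r rt) |> Option.isSome_iff_exists.mp
          rw [hi0]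
          simp only [Option.map_some, Option.getD_some]
          push_cast
          ring

-- the argmin fold equals B's index(min(...)) pattern on a nonempty key list
theorem amF_eq_index (k0 : Int) (rest : List Int) :
    amF none (-1) 0 (k0 :: rest) =
      (match PySem.List.index? (k0 :: rest) (ksmin (k0 :: rest)) with
       | some j => (j : Int)
       | none => -1) := by
  have hamf : amF none (-1) 0 (k0 :: rest) = amF (some k0) 0 1 rest := by
    simp [amF]
  rw [hamf, amF_some]
  by_cases ht : rest.all (fun j => decide (k0 ≤ j)) = true
  · rw [if_pos ht]
    have hfold : ksmin (k0 :: rest) = k0 := by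
      simp only [ksmin]
      exact foldl_min_eq_self rest k0 (by simpa using ht)
    rw [hfold, PySem.List.index?_cons_self]
    rfl
  · rw [if_neg ht]
    simp only [List.all_eq_true, not_forall] at ht
    obtain ⟨j, hj, hjk⟩ := ht
    simp only [decide_eq_true_eq, not_le] at hjk
    cases rest with
    | nil => simp at hj
    | cons r rt =>
      have hmin_lt : ksmin (r :: rt) < k0 :=
        lt_of_le_of_lt (ksmin_le_mem _ _ hj) hjk
      rw [ksmin_cons_cons, min_eq_right (le_of_lt hmin_lt)]
      rw [PySem.List.index?_cons_of_ne _ (ne_of_gt hmin_lt)]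
      obtain ⟨i0, hi0⟩ := (PySem.List.index?_isSome_iff (r :: rt) (ksmin (r :: rt))).mpr
        (ksmin_mem r rt) |> Option.isSome_iff_exists.mp
      rw [hi0]
      simp only [Option.map_some, Option.getD_some]
      push_cast
      ring

-- ===== VERDICT (by name: the statement is the Claim_ definition above) =====
theorem equilibrio_spec : Claim_equal_equilibrio := by
  intro l _
  unfold Spec_equilibrio equilibrio equilibrio_alt
  cases l with
  | nil => rfl
  | cons x t =>
    simp only [if_neg (List.cons_ne_nil x t)]
    rw [foldA_eq, foldB_eq, List.nil_append, zip_prefs_eq_dkeys,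
        show (List.foldl (fun a e => a + e) 0 (x :: t)) - 0
           = List.foldl (fun a e => a + e) 0 (x :: t) from by ring]
    have hdk : dkeys (List.foldl (fun a e => a + e) 0 (x :: t)) 0 (x :: t)
        = |List.foldl (fun a e => a + e) 0 (x :: t) - x - 0|
          :: dkeys (List.foldl (fun a e => a + e) 0 (x :: t) - x) (0 + x) t := rfl
    rw [hdk, PySem.List.min?_id_cons, amF_eq_index]
    rfl
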